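-- pv_equiv track=rewrite | github.com/Jackfnvpn/Uni | 2anno/Algoritmi/Modulo1/Esami/Differenza.py | Oracolo
-- ===== SOURCE A (Python) =====
-- def Oracolo(A):
--
--     zero=[0]*len(A)
--     uno=[0]*len(A)
--
--     if A[1]==0:
--         zero[1]=1
--
--     else:
--         uno[1]=1
--
--     for x in range(1,len(A)):
--         if A[x]==0:
--             zero[x]=1+zero[x-1]
--             uno[x]=uno[x-1]
--         else:
--             uno[x]=1+uno[x-1]
--             zero[x]=zero[x-1]
--     return uno,zero
-- ===== SOURCE B (Python) =====
-- def Oracolo(A):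
--     n = len(A)
--     # positions (>= 1) holding a zero, in increasing order
--     zpos = [x for x in range(1, n) if A[x] == 0]
--     zero = [0] * n
--     uno = [0] * n
--     j = 0  # pointer into zpos: number of zero positions <= current x
--     for x in range(1, n):
--         if j < len(zpos) and zpos[j] == x:
--             j += 1
--         zero[x] = j
--         uno[x] = x - j
--     return uno, zero
-- ===== Notes on version B (the rewrite author's own statement) =====
-- stated objective: alternative
-- what changed: B first extracts the sorted list of zero positions with a comprehension, then fills both arrays by merging that position list with the index range using a single pointer j (zero[x]=j, uno[x]=x-j), instead of A's per-index paired prefix updates reading the previous array cells; B also returns on lists of length < 2 where A raises IndexError.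
-- outside the precondition, e.g. on Oracolo([1]): A raises IndexError, B returns ([0], [0]); on Oracolo([]): A raises IndexError, B returns ([], [])
import Mathlib
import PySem

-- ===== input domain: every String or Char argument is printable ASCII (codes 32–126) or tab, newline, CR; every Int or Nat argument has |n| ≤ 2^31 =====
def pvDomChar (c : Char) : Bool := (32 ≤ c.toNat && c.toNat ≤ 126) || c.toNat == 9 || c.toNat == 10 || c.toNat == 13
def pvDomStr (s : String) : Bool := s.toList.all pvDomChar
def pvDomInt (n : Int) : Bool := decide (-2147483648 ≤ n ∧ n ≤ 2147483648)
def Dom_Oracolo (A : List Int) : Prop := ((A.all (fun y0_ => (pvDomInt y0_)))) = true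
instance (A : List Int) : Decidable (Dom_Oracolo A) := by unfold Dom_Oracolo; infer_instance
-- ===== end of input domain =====

-- B extracts the list of zero positions once and fills both arrays by merging it with the index range via a pointer (alternative decomposition; return-value equivalence on lists of length ≥ 2, where A does not raise).


-- ===== PORT A =====
-- literal port of A: two arrays, a pre-set at index 1 from A[1] (none = IndexError, outside Pre_),
-- then the loop over range(1, len(A)) updating both arrays in step.
def Oracolo (A : List Int) : List Int × List Int :=
  let zero0 : List Int := List.replicate A.length 0
  let uno0 : List Int := List.replicate A.length 0
  match PySem.List.pyGet? A 1 with
  | none => ([], [])   -- A[1] : IndexError; this input is excluded by Pre_Oracolo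
  | some a1 =>
    let (zero1, uno1) :=
      if a1 = 0 then (PySem.List.pySetD zero0 1 1, uno0)
      else (zero0, PySem.List.pySetD uno0 1 1)
    (PySem.List.pyRange 1 (A.length : Int) 1).foldl
      (fun (p : List Int × List Int) x =>
        if PySem.List.pyGetD A x 0 = 0 then
          (PySem.List.pySetD p.1 x (PySem.List.pyGetD p.1 (x - 1) 0),
           PySem.List.pySetD p.2 x (1 + PySem.List.pyGetD p.2 (x - 1) 0))
        else
          (PySem.List.pySetD p.1 x (1 + PySem.List.pyGetD p.1 (x - 1) 0),
           PySem.List.pySetD p.2 x (PySem.List.pyGetD p.2 (x - 1) 0)))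
      (uno1, zero1)

-- ===== PORT B =====
-- B's loop body: 'if j < len(zpos) and zpos[j] == x: j += 1; zero[x] = j; uno[x] = x - j'
-- (state is (j, zero, uno); the guard 'j < len(zpos)' keeps the zpos[j] access in range)
def bstep (zpos : List Int) (s : Int × List Int × List Int) (x : Int) : Int × List Int × List Int :=
  let j := if s.1 < (zpos.length : Int) ∧ PySem.List.pyGetD zpos s.1 0 = x then s.1 + 1 else s.1
  (j, PySem.List.pySetD s.2.1 x j, PySem.List.pySetD s.2.2 x (x - j))

-- literal port of B: the comprehension building the zero-position list, then the merging loop.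
def Oracolo_alt (A : List Int) : List Int × List Int :=
  let zpos : List Int :=
    (PySem.List.pyRange 1 (A.length : Int) 1).filter (fun x => PySem.List.pyGetD A x 0 == 0)
  let r :=
    (PySem.List.pyRange 1 (A.length : Int) 1).foldl (bstep zpos)
      (0, List.replicate A.length 0, List.replicate A.length 0)
  (r.2.2, r.2.1)

-- ===== PRECONDITION & SPEC =====
-- Pre_ excludes lists of length < 2, on which A raises IndexError at A[1].
def Pre_Oracolo (A : List Int) : Prop := 2 ≤ A.length
instance (A : List Int) : Decidable (Pre_Oracolo A) := by unfold Pre_Oracolo; infer_instance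
def pvWitness_Oracolo : List Int := ([0, 3, 0] : List Int)

def Spec_Oracolo (A : List Int) (out : List Int × List Int) : Prop := out = Oracolo_alt A
instance (A : List Int) (out : List Int × List Int) : Decidable (Spec_Oracolo A out) := by unfold Spec_Oracolo; infer_instance

-- ===== CLAIM (what is proved, stated in full; the proofs are below) =====
def Claim_equal_Oracolo : Prop := ∀ (A : List Int), Dom_Oracolo A → Pre_Oracolo A → Spec_Oracolo A (Oracolo A)

-- ===== LEMMAS AND PROOFS =====

-- number of zeros among A[1..k]
def czA (A : List Int) : Nat → Int
  | 0 => 0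
  | k + 1 => czA A k + (if A.getD (k + 1) 0 = 0 then 1 else 0)

lemma czA_nonneg (A : List Int) (k : Nat) : 0 ≤ czA A k := by
  induction k with
  | zero => simp [czA]
  | succ k ih => simp only [czA]; split_ifs <;> omega

lemma czA_succ (A : List Int) (m : Nat) (h1 : 1 ≤ m) :
    czA A m = czA A (m - 1) + (if A.getD m 0 = 0 then 1 else 0) := by
  conv_lhs => rw [show m = (m - 1) + 1 from by omega]
  simp only [czA]
  rw [show m - 1 + 1 = m from by omega]

-- the suffix of B's zero-position list starting at position s
def zposF (A : List Int) (s : Int) : List Int :=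
  (PySem.List.pyRange s (A.length : Int) 1).filter (fun x => PySem.List.pyGetD A x 0 == 0)

lemma mem_zposF (A : List Int) (s : Int) (y : Int) (hy : y ∈ zposF A s) : s ≤ y := by
  unfold zposF at hy
  have := List.mem_filter.mp hy
  exact ((PySem.List.mem_pyRange_one).mp this.1).1

lemma zposF_step (A : List Int) (m : Nat) (hm : m < A.length) :
    zposF A (m : Int) =
      if A.getD m 0 = 0 then (m : Int) :: zposF A ((m : Int) + 1) else zposF A ((m : Int) + 1) := by
  unfold zposF
  rw [PySem.List.pyRange_one_cons (by exact_mod_cast hm)]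
  simp only [List.filter_cons, PySem.List.pyGetD_natCast]
  by_cases h : A.getD m 0 = 0
  · rw [if_pos h, if_pos (by simpa using h)]
  · rw [if_neg h, if_neg (by simpa using h)]

lemma bstep_def (zpos : List Int) (s : Int × List Int × List Int) (x : Int) :
    bstep zpos s x =
      ((if s.1 < (zpos.length : Int) ∧ PySem.List.pyGetD zpos s.1 0 = x then s.1 + 1 else s.1),
       PySem.List.pySetD s.2.1 x
         (if s.1 < (zpos.length : Int) ∧ PySem.List.pyGetD zpos s.1 0 = x then s.1 + 1 else s.1),
       PySem.List.pySetD s.2.2 x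
         (x - (if s.1 < (zpos.length : Int) ∧ PySem.List.pyGetD zpos s.1 0 = x then s.1 + 1 else s.1))) := rfl

-- invariant of B's merging loop after processing x = 1 .. m-1
lemma b_fold (A : List Int) (m : Nat) (h1 : 1 ≤ m) (hm : m ≤ A.length) :
    let zpos := zposF A 1
    let r := (PySem.List.pyRange 1 (m : Int) 1).foldl (bstep zpos)
      (0, List.replicate A.length (0 : Int), List.replicate A.length (0 : Int))
    r.1 = czA A (m - 1) ∧ zpos.drop (czA A (m - 1)).toNat = zposF A (m : Int) ∧
    r.2.1.length = A.length ∧ r.2.2.length = A.length ∧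
    ∀ i : Nat, (r.2.1.getD i 0 = if 1 ≤ i ∧ i < m then czA A i else 0) ∧
      (r.2.2.getD i 0 = if 1 ≤ i ∧ i < m then (i : Int) - czA A i else 0) := by
  induction m with
  | zero => omega
  | succ m ih =>
    intro zpos r
    by_cases hm0 : m = 0
    · -- base: m+1 = 1, the range is empty, the state is the initial state
      subst hm0
      simp only [r]
      rw [show (((1 : Nat) : Int)) = (1 : Int) from rfl, PySem.List.pyRange_one_eq_nil (by omega)]
      simp only [List.foldl_nil]
      refine ⟨rfl, ?_, by simp, by simp, ?_⟩
      · show zpos.drop (czA A 0).toNat = zposF A ((1:Nat) : Int)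
        rfl
      · intro i
        constructor <;> (rw [if_neg (by omega)]; simp)
    · have h1m : 1 ≤ m := by omega
      have hmlen : m < A.length := by omega
      obtain ⟨ihj, ihdrop, ihl1, ihl2, ihp⟩ := ih h1m (by omega)
      simp only [r]
      rw [show (((m + 1 : Nat)) : Int) = ((m : Nat) : Int) + 1 by push_cast; ring,
          PySem.List.pyRange_one_succ_right (by exact_mod_cast h1m), List.foldl_append]
      set r0 := (PySem.List.pyRange 1 (m : Int) 1).foldl (bstep zpos)
        (0, List.replicate A.length (0 : Int), List.replicate A.length (0 : Int)) with hr0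
      simp only [List.foldl_cons, List.foldl_nil, bstep_def]
      set j := czA A (m - 1) with hj
      have hjnn : 0 ≤ j := czA_nonneg A (m - 1)
      have hjcast : ((j.toNat : Nat) : Int) = j := Int.toNat_of_nonneg hjnn
      have hstep := zposF_step A m hmlen
      have hget0 : (zposF A (m : Int))[0]? = zpos[j.toNat]? := by
        rw [← ihdrop, List.getElem?_drop, Nat.add_zero]
      -- the guard of B's loop body fires exactly when A[m] == 0
      have hcond : (j < (zpos.length : Int) ∧ PySem.List.pyGetD zpos j 0 = (m : Int)) ↔
          A.getD m 0 = 0 := by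
        constructor
        · rintro ⟨hlt, heq⟩
          have hltN : j.toNat < zpos.length := by omega
          have hval : PySem.List.pyGetD zpos j 0 = zpos[j.toNat] := by
            conv_lhs => rw [← hjcast]
            rw [PySem.List.pyGetD_natCast, List.getD_eq_getElem _ 0 hltN]
          have hmem : ((m : Nat) : Int) ∈ zposF A (m : Int) := by
            have : (zposF A (m : Int))[0]? = some ((m : Nat) : Int) := by
              rw [hget0, List.getElem?_eq_getElem hltN, ← hval, heq]
            exact List.mem_of_getElem? this
          by_contra hz
          rw [hstep, if_neg hz] at hmem
          have := mem_zposF A ((m : Int) + 1) _ hmem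
          omega
        · intro hz
          have hhead : (zposF A (m : Int))[0]? = some ((m : Nat) : Int) := by
            rw [hstep, if_pos hz]; rfl
          have hsome : zpos[j.toNat]? = some ((m : Nat) : Int) := by rw [← hget0, hhead]
          have hltN : j.toNat < zpos.length := by
            by_contra h
            rw [List.getElem?_eq_none (by omega)] at hsome
            simp at hsome
          refine ⟨by omega, ?_⟩
          rw [← hjcast, PySem.List.pyGetD_natCast, List.getD_eq_getElem?_getD, hsome]
          rfl
      have hczm := czA_succ A m h1m
      have hjnew : (if r0.1 < (zpos.length : Int) ∧ PySem.List.pyGetD zpos r0.1 0 = (m : Int)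
          then r0.1 + 1 else r0.1) = czA A m := by
        rw [ihj]
        by_cases hz : A.getD m 0 = 0
        · rw [if_pos (hcond.mpr hz), hczm, if_pos hz, hj]
        · rw [if_neg (fun hc => hz (hcond.mp hc)), hczm, if_neg hz, hj]; ring
      rw [hjnew]
      refine ⟨rfl, ?_, ?_, ?_, ?_⟩
      · -- drop invariant advances
        show zpos.drop (czA A ((m + 1) - 1)).toNat = zposF A (((m + 1 : Nat)) : Int)
        rw [show (m + 1) - 1 = m from rfl,
            show (((m + 1 : Nat)) : Int) = ((m : Nat) : Int) + 1 by push_cast; ring]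
        have ihdrop' : zpos.drop j.toNat = zposF A (m : Int) := ihdrop
        by_cases hz : A.getD m 0 = 0
        · have : (czA A m).toNat = j.toNat + 1 := by
            rw [hczm, if_pos hz, ← hj]; omega
          rw [this, ← List.drop_drop, ihdrop', hstep, if_pos hz, List.drop_one, List.tail_cons]
        · have : (czA A m).toNat = j.toNat := by rw [hczm, if_neg hz, ← hj]; omega
          rw [this, ihdrop', hstep, if_neg hz]
      · simp [PySem.List.pySetD_natCast, ihl1]
      · simp [PySem.List.pySetD_natCast, ihl2]
      · intro i
        simp only [PySem.List.pySetD_natCast]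
        by_cases hi : i = m
        · subst hi
          constructor
          · rw [List.getD_eq_getElem?_getD, List.getElem?_set_self (by rw [ihl1]; omega),
                if_pos (show 1 ≤ i ∧ i < i + 1 from by omega)]
            rfl
          · rw [List.getD_eq_getElem?_getD, List.getElem?_set_self (by rw [ihl2]; omega),
                if_pos (show 1 ≤ i ∧ i < i + 1 from by omega)]
            rfl
        · constructor
          · rw [List.getD_eq_getElem?_getD, List.getElem?_set_ne (by omega),
                ← List.getD_eq_getElem?_getD, (ihp i).1]
            by_cases h1i : 1 ≤ i ∧ i < m
            · rw [if_pos h1i, if_pos (by omega)]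
            · rw [if_neg h1i, if_neg (by omega)]
          · rw [List.getD_eq_getElem?_getD, List.getElem?_set_ne (by omega),
                ← List.getD_eq_getElem?_getD, (ihp i).2]
            by_cases h1i : 1 ≤ i ∧ i < m
            · rw [if_pos h1i, if_pos (by omega)]
            · rw [if_neg h1i, if_neg (by omega)]

-- characterization of A's loop (unchanged from the literal transliteration)
lemma a_fold (A : List Int) (m : Nat) (hm : m ≤ A.length) (u z : List Int)
    (hul : u.length = A.length) (hzl : z.length = A.length)
    (hu0 : u.getD 0 0 = 0) (hz0 : z.getD 0 0 = 0) :
    let r := (PySem.List.pyRange 1 (m : Int) 1).foldl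
      (fun (p : List Int × List Int) x =>
        if PySem.List.pyGetD A x 0 = 0 then
          (PySem.List.pySetD p.1 x (PySem.List.pyGetD p.1 (x - 1) 0),
           PySem.List.pySetD p.2 x (1 + PySem.List.pyGetD p.2 (x - 1) 0))
        else
          (PySem.List.pySetD p.1 x (1 + PySem.List.pyGetD p.1 (x - 1) 0),
           PySem.List.pySetD p.2 x (PySem.List.pyGetD p.2 (x - 1) 0)))
      (u, z)
    (r.1.length = A.length ∧ r.2.length = A.length) ∧
      ∀ i : Nat, (r.1.getD i 0 = if 1 ≤ i ∧ i < m then (i : Int) - czA A i else u.getD i 0) ∧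
        (r.2.getD i 0 = if 1 ≤ i ∧ i < m then czA A i else z.getD i 0) := by
  induction m with
  | zero =>
    intro r
    simp only [r]
    rw [PySem.List.pyRange_one_eq_nil (by omega)]
    simp [hul, hzl]
  | succ m ih =>
    intro r
    by_cases hm1 : m = 0
    · subst hm1
      simp only [r]
      rw [PySem.List.pyRange_one_eq_nil (by omega)]
      simp [hul, hzl]
      intro i
      constructor <;> (intro h1 h2; omega)
    · have hm' : m ≤ A.length := by omega
      obtain ⟨⟨ihl1, ihl2⟩, ihp⟩ := ih hm'
      simp only [r]
      rw [show (((m+1 : Nat)) : Int) = ((m : Nat) : Int) + 1 by push_cast; ring,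
          PySem.List.pyRange_one_succ_right (by omega : (1:Int) ≤ (m:Int)), List.foldl_append]
      set r0 := (PySem.List.pyRange 1 (m : Int) 1).foldl
        (fun (p : List Int × List Int) x =>
          if PySem.List.pyGetD A x 0 = 0 then
            (PySem.List.pySetD p.1 x (PySem.List.pyGetD p.1 (x - 1) 0),
             PySem.List.pySetD p.2 x (1 + PySem.List.pyGetD p.2 (x - 1) 0))
          else
            (PySem.List.pySetD p.1 x (1 + PySem.List.pyGetD p.1 (x - 1) 0),
             PySem.List.pySetD p.2 x (PySem.List.pyGetD p.2 (x - 1) 0)))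
        (u, z) with hr0
      simp only [List.foldl_cons, List.foldl_nil]
      have hprev1 : PySem.List.pyGetD r0.1 ((m:Int) - 1) 0 = ((m:Int) - 1) - czA A (m-1) := by
        rw [show ((m:Int) - 1) = (((m-1 : Nat)) : Int) by omega]
        rw [PySem.List.pyGetD_natCast, (ihp (m-1)).1]
        by_cases h1 : 1 ≤ m - 1
        · rw [if_pos ⟨h1, by omega⟩]
        · have h10 : m - 1 = 0 := by omega
          rw [h10, if_neg (by omega), hu0]
          simp only [czA]
          omega
      have hprev2 : PySem.List.pyGetD r0.2 ((m:Int) - 1) 0 = czA A (m-1) := by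
        rw [show ((m:Int) - 1) = (((m-1 : Nat)) : Int) by omega]
        rw [PySem.List.pyGetD_natCast, (ihp (m-1)).2]
        by_cases h1 : 1 ≤ m - 1
        · rw [if_pos ⟨h1, by omega⟩]
        · have h10 : m - 1 = 0 := by omega
          rw [h10, if_neg (by omega), hz0]
          simp only [czA]
      have helt : PySem.List.pyGetD A ((m:Int)) 0 = A.getD m 0 := PySem.List.pyGetD_natCast A m 0
      have hczm : czA A m = czA A (m-1) + (if A.getD m 0 = 0 then 1 else 0) := czA_succ A m (by omega)
      rw [helt]
      by_cases ha : A.getD m 0 = 0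
      · rw [if_pos ha]
        simp only [PySem.List.pySetD_natCast, hprev1, hprev2]
        refine ⟨⟨by simp [ihl1], by simp [ihl2]⟩, fun i => ?_⟩
        by_cases hi : i = m
        · subst hi
          constructor
          · rw [List.getD_eq_getElem?_getD, List.getElem?_set_self (by rw [ihl1]; omega)]
            rw [if_pos (show 1 ≤ i ∧ i < i+1 from by omega)]
            simp only [Option.getD_some]
            rw [hczm, if_pos ha]; ring
          · rw [List.getD_eq_getElem?_getD, List.getElem?_set_self (by rw [ihl2]; omega)]
            rw [if_pos (show 1 ≤ i ∧ i < i+1 from by omega)]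
            simp only [Option.getD_some]
            rw [hczm, if_pos ha]; ring
        · constructor
          · rw [List.getD_eq_getElem?_getD, List.getElem?_set_ne (by omega),
                ← List.getD_eq_getElem?_getD, (ihp i).1]
            by_cases h1 : 1 ≤ i ∧ i < m
            · rw [if_pos h1, if_pos (by omega)]
            · rw [if_neg h1, if_neg (by omega)]
          · rw [List.getD_eq_getElem?_getD, List.getElem?_set_ne (by omega),
                ← List.getD_eq_getElem?_getD, (ihp i).2]
            by_cases h1 : 1 ≤ i ∧ i < m
            · rw [if_pos h1, if_pos (by omega)]
            · rw [if_neg h1, if_neg (by omega)]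
      · rw [if_neg ha]
        simp only [PySem.List.pySetD_natCast, hprev1, hprev2]
        refine ⟨⟨by simp [ihl1], by simp [ihl2]⟩, fun i => ?_⟩
        by_cases hi : i = m
        · subst hi
          constructor
          · rw [List.getD_eq_getElem?_getD, List.getElem?_set_self (by rw [ihl1]; omega)]
            rw [if_pos (show 1 ≤ i ∧ i < i+1 from by omega)]
            simp only [Option.getD_some]
            rw [hczm, if_neg ha]; ring
          · rw [List.getD_eq_getElem?_getD, List.getElem?_set_self (by rw [ihl2]; omega)]
            rw [if_pos (show 1 ≤ i ∧ i < i+1 from by omega)]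
            simp only [Option.getD_some]
            rw [hczm, if_neg ha]; ring
        · constructor
          · rw [List.getD_eq_getElem?_getD, List.getElem?_set_ne (by omega),
                ← List.getD_eq_getElem?_getD, (ihp i).1]
            by_cases h1 : 1 ≤ i ∧ i < m
            · rw [if_pos h1, if_pos (by omega)]
            · rw [if_neg h1, if_neg (by omega)]
          · rw [List.getD_eq_getElem?_getD, List.getElem?_set_ne (by omega),
                ← List.getD_eq_getElem?_getD, (ihp i).2]
            by_cases h1 : 1 ≤ i ∧ i < m
            · rw [if_pos h1, if_pos (by omega)]
            · rw [if_neg h1, if_neg (by omega)]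

-- per-index characterization of B's result
lemma alt_char (A : List Int) (hp : 1 ≤ A.length) :
    (Oracolo_alt A).1.length = A.length ∧ (Oracolo_alt A).2.length = A.length ∧
    ∀ i : Nat,
      ((Oracolo_alt A).1.getD i 0 = if 1 ≤ i ∧ i < A.length then (i : Int) - czA A i else 0) ∧
      ((Oracolo_alt A).2.getD i 0 = if 1 ≤ i ∧ i < A.length then czA A i else 0) := by
  obtain ⟨_, _, hl1, hl2, hip⟩ := b_fold A A.length hp le_rfl
  exact ⟨hl2, hl1, fun i => ⟨(hip i).2, (hip i).1⟩⟩

theorem oracolo_main (A : List Int) (hp : 2 ≤ A.length) : Oracolo A = Oracolo_alt A := by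
  have hget : PySem.List.pyGet? A 1 = some (A.getD 1 0) := by
    simp [PySem.List.pyGet?, PySem.List.pyIdx?]
    rw [if_pos (show 1 < A.length by omega)]
    simp [List.getElem?_eq_getElem (show 1 < A.length by omega)]
  have hinit : ∀ w : List Int, (w = List.replicate A.length 0 ∨
      w = PySem.List.pySetD (List.replicate A.length 0) 1 1) →
      w.length = A.length ∧ w.getD 0 0 = 0 := by
    rintro w (rfl | rfl)
    · simp
    · rw [show ((1:Int)) = ((1:Nat):Int) from rfl, PySem.List.pySetD_natCast]
      refine ⟨by simp, ?_⟩
      rw [List.getD_eq_getElem?_getD, List.getElem?_set_ne (by omega)]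
      simp [show 0 < A.length by omega]
  obtain ⟨hbl1, hbl2, hbp⟩ := alt_char A (by omega)
  show (match PySem.List.pyGet? A 1 with
    | none => (([] : List Int), ([] : List Int))
    | some a1 =>
      let (zero1, uno1) :=
        if a1 = 0 then (PySem.List.pySetD (List.replicate A.length 0) 1 1, List.replicate A.length 0)
        else (List.replicate A.length 0, PySem.List.pySetD (List.replicate A.length 0) 1 1)
      (PySem.List.pyRange 1 (A.length : Int) 1).foldl
        (fun (p : List Int × List Int) x =>
          if PySem.List.pyGetD A x 0 = 0 then
            (PySem.List.pySetD p.1 x (PySem.List.pyGetD p.1 (x - 1) 0),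
             PySem.List.pySetD p.2 x (1 + PySem.List.pyGetD p.2 (x - 1) 0))
          else
            (PySem.List.pySetD p.1 x (1 + PySem.List.pyGetD p.1 (x - 1) 0),
             PySem.List.pySetD p.2 x (PySem.List.pyGetD p.2 (x - 1) 0)))
        (uno1, zero1)) = Oracolo_alt A
  rw [hget]
  have final : ∀ u0 z0 : List Int,
      u0.length = A.length → z0.length = A.length → u0.getD 0 0 = 0 → z0.getD 0 0 = 0 →
      ((PySem.List.pyRange 1 (A.length : Int) 1).foldl
        (fun (p : List Int × List Int) x =>
          if PySem.List.pyGetD A x 0 = 0 then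
            (PySem.List.pySetD p.1 x (PySem.List.pyGetD p.1 (x - 1) 0),
             PySem.List.pySetD p.2 x (1 + PySem.List.pyGetD p.2 (x - 1) 0))
          else
            (PySem.List.pySetD p.1 x (1 + PySem.List.pyGetD p.1 (x - 1) 0),
             PySem.List.pySetD p.2 x (PySem.List.pyGetD p.2 (x - 1) 0)))
        (u0, z0)) = Oracolo_alt A := by
    intro u0 z0 hul hzl hu0 hz0
    obtain ⟨⟨hal1, hal2⟩, hap⟩ := a_fold A A.length le_rfl u0 z0 hul hzl hu0 hz0
    refine Prod.ext ?_ ?_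
    · apply List.ext_getElem
      · rw [hal1, hbl1]
      · intro i hi1 hi2
        have hiA : i < A.length := by rwa [hal1] at hi1
        rw [← List.getD_eq_getElem _ 0 hi1, ← List.getD_eq_getElem _ 0 hi2,
            (hap i).1, (hbp i).1]
        by_cases h1 : 1 ≤ i
        · rw [if_pos ⟨h1, hiA⟩, if_pos ⟨h1, hiA⟩]
        · rw [if_neg (by omega), if_neg (by omega)]
          have h0 : i = 0 := by omega
          subst h0
          exact hu0
    · apply List.ext_getElem
      · rw [hal2, hbl2]
      · intro i hi1 hi2
        have hiA : i < A.length := by rwa [hal2] at hi1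
        rw [← List.getD_eq_getElem _ 0 hi1, ← List.getD_eq_getElem _ 0 hi2,
            (hap i).2, (hbp i).2]
        by_cases h1 : 1 ≤ i
        · rw [if_pos ⟨h1, hiA⟩, if_pos ⟨h1, hiA⟩]
        · rw [if_neg (by omega), if_neg (by omega)]
          have h0 : i = 0 := by omega
          subst h0
          exact hz0
  by_cases ha1 : A.getD 1 0 = 0
  · show (let (zero1, uno1) :=
        if A.getD 1 0 = 0 then (PySem.List.pySetD (List.replicate A.length 0) 1 1, List.replicate A.length (0:Int))
        else (List.replicate A.length 0, PySem.List.pySetD (List.replicate A.length 0) 1 1)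
      (PySem.List.pyRange 1 (A.length : Int) 1).foldl
        (fun (p : List Int × List Int) x =>
          if PySem.List.pyGetD A x 0 = 0 then
            (PySem.List.pySetD p.1 x (PySem.List.pyGetD p.1 (x - 1) 0),
             PySem.List.pySetD p.2 x (1 + PySem.List.pyGetD p.2 (x - 1) 0))
          else
            (PySem.List.pySetD p.1 x (1 + PySem.List.pyGetD p.1 (x - 1) 0),
             PySem.List.pySetD p.2 x (PySem.List.pyGetD p.2 (x - 1) 0)))
        (uno1, zero1)) = Oracolo_alt A
    rw [if_pos ha1]
    exact final _ _ (hinit _ (Or.inl rfl)).1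
      (by rw [show ((1:Int)) = ((1:Nat):Int) from rfl, PySem.List.pySetD_natCast]; simp)
      (hinit _ (Or.inl rfl)).2 (hinit _ (Or.inr rfl)).2
  · show (let (zero1, uno1) :=
        if A.getD 1 0 = 0 then (PySem.List.pySetD (List.replicate A.length 0) 1 1, List.replicate A.length (0:Int))
        else (List.replicate A.length 0, PySem.List.pySetD (List.replicate A.length 0) 1 1)
      (PySem.List.pyRange 1 (A.length : Int) 1).foldl
        (fun (p : List Int × List Int) x =>
          if PySem.List.pyGetD A x 0 = 0 then
            (PySem.List.pySetD p.1 x (PySem.List.pyGetD p.1 (x - 1) 0),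
             PySem.List.pySetD p.2 x (1 + PySem.List.pyGetD p.2 (x - 1) 0))
          else
            (PySem.List.pySetD p.1 x (1 + PySem.List.pyGetD p.1 (x - 1) 0),
             PySem.List.pySetD p.2 x (PySem.List.pyGetD p.2 (x - 1) 0)))
        (uno1, zero1)) = Oracolo_alt A
    rw [if_neg ha1]
    exact final _ _ (hinit _ (Or.inr rfl)).1 (hinit _ (Or.inl rfl)).1
      (hinit _ (Or.inr rfl)).2 (hinit _ (Or.inl rfl)).2

-- ===== VERDICT (by name: the statement is the Claim_ definition above) =====
theorem Oracolo_spec : Claim_equal_Oracolo := by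
  intro A _ hp
  unfold Pre_Oracolo at hp
  unfold Spec_Oracolo
  exact oracolo_main A hp
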